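-- pv_equiv track=rewrite | github.com/chvjak/hr-practice | bot-clean.py | getNextMove
-- ===== SOURCE A (Python) =====
-- def getNextMove(r, c, grid):
--     # print all the moves here
--
--     if len([r for r in grid if 'd' in r]) == 0:
--         return ""
--
--     N = len(grid)
--     m_pos = (r, c)
--     g_pos = [(i, grid[i].index('d')) for i in range(N) if 'd' in grid[i]]
--
--     deltas_rc = [(m_pos[0] - g_r, m_pos[1] - g_c) for (g_r, g_c) in g_pos]
--     deltas_rc.sort(key=lambda delta: abs(delta[0]) + abs(delta[1]))
--
--     delta_r, delta_c = deltas_rc[0]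
--
--
--     res = ""
--     if delta_r == 0 and delta_c == 0:
--         res = "CLEAN"
--     elif delta_r != 0:
--         res = "UP" if delta_r > 0 else  "DOWN"
--     else:
--         res = "LEFT" if delta_c > 0 else  "RIGHT"
--
--     return res
-- ===== SOURCE B (Python) =====
-- def getNextMove(r, c, grid):
--     # single accumulating scan: keep the closest dirt seen so far (strict <, so the
--     # earliest row wins ties, matching the stable sort's tie-breaking)
--     best = None  # (dist, delta_r, delta_c)
--     for i in range(len(grid)):
--         row = grid[i]
--         if 'd' not in row:
--             continue
--         delta_r = r - i
--         delta_c = c - row.index('d')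
--         dist = abs(delta_r) + abs(delta_c)
--         if best is None or dist < best[0]:
--             best = (dist, delta_r, delta_c)
--     if best is None:
--         return ""
--     _, delta_r, delta_c = best
--     if delta_r == 0 and delta_c == 0:
--         return "CLEAN"
--     if delta_r != 0:
--         return "UP" if delta_r > 0 else "DOWN"
--     return "LEFT" if delta_c > 0 else "RIGHT"
-- ===== Notes on version B (the rewrite author's own statement) =====
-- stated objective: simpler
-- what changed: Replaces the emptiness comprehension, the positions/deltas intermediate lists and the stable sort with one accumulating scan over the rows that keeps the closest dirt seen so far (strict < preserves the sort's earliest-row tie-breaking).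
import Mathlib
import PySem

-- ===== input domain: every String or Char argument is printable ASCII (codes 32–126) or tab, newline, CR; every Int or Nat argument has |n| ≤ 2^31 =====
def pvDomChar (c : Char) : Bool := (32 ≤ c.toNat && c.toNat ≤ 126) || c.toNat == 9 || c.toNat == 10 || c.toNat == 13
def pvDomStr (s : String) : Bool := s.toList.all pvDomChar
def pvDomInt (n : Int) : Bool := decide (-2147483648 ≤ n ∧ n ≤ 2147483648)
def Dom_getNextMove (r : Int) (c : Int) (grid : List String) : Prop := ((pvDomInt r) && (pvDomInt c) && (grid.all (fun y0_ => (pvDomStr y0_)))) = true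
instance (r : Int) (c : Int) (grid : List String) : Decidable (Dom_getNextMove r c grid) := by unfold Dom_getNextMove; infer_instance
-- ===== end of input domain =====

-- B replaces A's intermediate lists and stable sort by one accumulating scan keeping the
-- closest dirt seen so far (strict <, so the earliest row wins ties): objective = simpler.

-- ===== PORT A =====
def getNextMove (r : Int) (c : Int) (grid : List String) : String :=
  if PySem.List.len (grid.filter (fun row => PySem.Str.isIn "d" row)) = 0 then ""
  else
    let N := grid.length
    -- grid[i].index('d') is guarded by 'd' in grid[i], so it equals str.find (exact here)
    let g_pos : List (Int × Int) :=
      (PySem.List.pyRange 0 (N : Int) 1).filterMap (fun i =>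
        if PySem.Str.isIn "d" (PySem.List.pyGetD grid i "") then
          some (i, PySem.Str.find (PySem.List.pyGetD grid i "") "d")
        else none)
    let deltas_rc := g_pos.map (fun p => (r - p.1, c - p.2))
    let deltas_sorted := PySem.List.sorted deltas_rc (fun d => |d.1| + |d.2|)
    -- deltas_rc[0]: only reached when the list is nonempty (the guard above)
    let d0 := PySem.List.pyGetD deltas_sorted 0 (0, 0)
    let delta_r := d0.1
    let delta_c := d0.2
    if delta_r = 0 ∧ delta_c = 0 then "CLEAN"
    else if delta_r ≠ 0 then (if delta_r > 0 then "UP" else "DOWN")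
    else (if delta_c > 0 then "LEFT" else "RIGHT")

-- ===== PORT B =====
-- loop body of Source B's single scan (state = best-so-far (dist, delta_r, delta_c))
def bestStep (r : Int) (c : Int) (grid : List String) (best : Option (Int × Int × Int)) (i : Int) : Option (Int × Int × Int) :=
  let row := PySem.List.pyGetD grid i ""
  if PySem.Str.isIn "d" row then
    let delta_r := r - i
    let delta_c := c - PySem.Str.find row "d"   -- row.index('d'), guarded by 'd' in row
    let dist := |delta_r| + |delta_c|
    match best with
    | none => some (dist, delta_r, delta_c)
    | some b => if dist < b.1 then some (dist, delta_r, delta_c) else some b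
  else best

def getNextMove_alt (r : Int) (c : Int) (grid : List String) : String :=
  let best := (PySem.List.pyRange 0 (grid.length : Int) 1).foldl (bestStep r c grid) none
  match best with
  | none => ""
  | some (_, delta_r, delta_c) =>
    if delta_r = 0 ∧ delta_c = 0 then "CLEAN"
    else if delta_r ≠ 0 then (if delta_r > 0 then "UP" else "DOWN")
    else (if delta_c > 0 then "LEFT" else "RIGHT")

-- ===== PRECONDITION & SPEC =====
def Spec_getNextMove (r : Int) (c : Int) (grid : List String) (out : String) : Prop := out = getNextMove_alt r c grid
instance (r : Int) (c : Int) (grid : List String) (out : String) : Decidable (Spec_getNextMove r c grid out) := by unfold Spec_getNextMove; infer_instance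

-- ===== CLAIM (what is proved, stated in full; the proofs are below) =====
def Claim_equal_getNextMove : Prop := ∀ (r : Int) (c : Int) (grid : List String), Dom_getNextMove r c grid → Spec_getNextMove r c grid (getNextMove r c grid)

-- ===== LEMMAS AND PROOFS =====

-- the sort key of A / the distance of B
def pvKey (d : Int × Int) : Int := |d.1| + |d.2|

-- the per-index delta produced by index i (none if row i has no dirt)
def pvDelta (r : Int) (c : Int) (grid : List String) (i : Int) : Option (Int × Int) :=
  if PySem.Str.isIn "d" (PySem.List.pyGetD grid i "") then
    some (r - i, c - PySem.Str.find (PySem.List.pyGetD grid i "") "d")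
  else none

-- first-minimum scan over deltas (strict <, so the earliest minimal element wins)
def pvMin (m : Int × Int) (ds : List (Int × Int)) : Int × Int :=
  ds.foldl (fun m d => if pvKey d < pvKey m then d else m) m

theorem pvFold_some (r c : Int) (grid : List String) :
    ∀ (l : List Int) (m : Int × Int),
      l.foldl (bestStep r c grid) (some (pvKey m, m.1, m.2)) =
        some (pvKey (pvMin m (l.filterMap (pvDelta r c grid))),
              (pvMin m (l.filterMap (pvDelta r c grid))).1,
              (pvMin m (l.filterMap (pvDelta r c grid))).2) := by
  intro l
  induction l with
  | nil => intro m; rfl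
  | cons i l ih =>
    intro m
    by_cases h : PySem.Str.isIn "d" (PySem.List.pyGetD grid i "") = true
    · have hD : (i :: l).filterMap (pvDelta r c grid)
          = (r - i, c - PySem.Str.find (PySem.List.pyGetD grid i "") "d")
              :: l.filterMap (pvDelta r c grid) :=
        by rw [List.filterMap_cons,
               show pvDelta r c grid i
                 = some (r - i, c - PySem.Str.find (PySem.List.pyGetD grid i "") "d") from
                 by rw [pvDelta, if_pos h]]
      have hstep : bestStep r c grid (some (pvKey m, m.1, m.2)) i
          = some (pvKey (if pvKey (r - i, c - PySem.Str.find (PySem.List.pyGetD grid i "") "d") < pvKey m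
                         then (r - i, c - PySem.Str.find (PySem.List.pyGetD grid i "") "d") else m),
                  (if pvKey (r - i, c - PySem.Str.find (PySem.List.pyGetD grid i "") "d") < pvKey m
                   then (r - i, c - PySem.Str.find (PySem.List.pyGetD grid i "") "d") else m).1,
                  (if pvKey (r - i, c - PySem.Str.find (PySem.List.pyGetD grid i "") "d") < pvKey m
                   then (r - i, c - PySem.Str.find (PySem.List.pyGetD grid i "") "d") else m).2) := by
        unfold bestStep
        rw [if_pos h]
        by_cases hlt : pvKey (r - i, c - PySem.Str.find (PySem.List.pyGetD grid i "") "d") < pvKey m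
        · rw [if_pos hlt]
          exact if_pos hlt
        · rw [if_neg hlt]
          exact if_neg hlt
      rw [List.foldl_cons, hstep, ih, hD]
      rfl
    · have hD : (i :: l).filterMap (pvDelta r c grid) = l.filterMap (pvDelta r c grid) :=
        by rw [List.filterMap_cons, show pvDelta r c grid i = none from by rw [pvDelta, if_neg h]]
      have hstep : bestStep r c grid (some (pvKey m, m.1, m.2)) i = some (pvKey m, m.1, m.2) := by
        unfold bestStep; rw [if_neg h]
      rw [List.foldl_cons, hstep, ih, hD]

theorem pvFold_none (r c : Int) (grid : List String) :
    ∀ (l : List Int),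
      l.foldl (bestStep r c grid) none =
        match l.filterMap (pvDelta r c grid) with
        | [] => none
        | d :: t => some (pvKey (pvMin d t), (pvMin d t).1, (pvMin d t).2) := by
  intro l
  induction l with
  | nil => rfl
  | cons i l ih =>
    by_cases h : PySem.Str.isIn "d" (PySem.List.pyGetD grid i "") = true
    · have hD : (i :: l).filterMap (pvDelta r c grid)
          = (r - i, c - PySem.Str.find (PySem.List.pyGetD grid i "") "d")
              :: l.filterMap (pvDelta r c grid) :=
        by rw [List.filterMap_cons,
               show pvDelta r c grid i
                 = some (r - i, c - PySem.Str.find (PySem.List.pyGetD grid i "") "d") from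
                 by rw [pvDelta, if_pos h]]
      have hstep : bestStep r c grid none i
          = some (pvKey (r - i, c - PySem.Str.find (PySem.List.pyGetD grid i "") "d"),
                  r - i, c - PySem.Str.find (PySem.List.pyGetD grid i "") "d") := by
        unfold bestStep; rw [if_pos h]; rfl
      rw [List.foldl_cons, hstep, hD,
          pvFold_some r c grid l (r - i, c - PySem.Str.find (PySem.List.pyGetD grid i "") "d")]
    · have hD : (i :: l).filterMap (pvDelta r c grid) = l.filterMap (pvDelta r c grid) :=
        by rw [List.filterMap_cons, show pvDelta r c grid i = none from by rw [pvDelta, if_neg h]]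
      have hstep : bestStep r c grid none i = none := by
        unfold bestStep; rw [if_neg h]
      rw [List.foldl_cons, hstep, ih, hD]

-- head of the insertion-sort fold = the first-minimum scan
theorem pvInsert_head :
    ∀ (t : List (Int × Int)) (m : Int × Int) (acc : List (Int × Int)),
      ∃ acc', t.foldl (fun acc x => PySem.List.insertBy (fun a b => decide (pvKey a < pvKey b)) x acc) (m :: acc)
        = pvMin m t :: acc' := by
  intro t
  induction t with
  | nil => intro m acc; exact ⟨acc, rfl⟩
  | cons x t ih =>
    intro m acc
    by_cases hlt : pvKey x < pvKey m
    · have h1 : PySem.List.insertBy (fun a b => decide (pvKey a < pvKey b)) x (m :: acc)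
          = x :: m :: acc := by
        simp only [PySem.List.insertBy]
        rw [if_pos (decide_eq_true hlt)]
      obtain ⟨acc', hacc⟩ := ih x (m :: acc)
      refine ⟨acc', ?_⟩
      rw [List.foldl_cons, h1, hacc]
      have : pvMin m (x :: t) = pvMin x t := by
        show pvMin (if pvKey x < pvKey m then x else m) t = pvMin x t
        rw [if_pos hlt]
      rw [this]
    · have h1 : PySem.List.insertBy (fun a b => decide (pvKey a < pvKey b)) x (m :: acc)
          = m :: PySem.List.insertBy (fun a b => decide (pvKey a < pvKey b)) x acc := by
        simp only [PySem.List.insertBy]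
        rw [if_neg (by simpa using hlt)]
      obtain ⟨acc', hacc⟩ := ih m (PySem.List.insertBy (fun a b => decide (pvKey a < pvKey b)) x acc)
      refine ⟨acc', ?_⟩
      rw [List.foldl_cons, h1, hacc]
      have : pvMin m (x :: t) = pvMin m t := by
        show pvMin (if pvKey x < pvKey m then x else m) t = pvMin m t
        rw [if_neg hlt]
      rw [this]

theorem pvSorted_head (d : Int × Int) (t : List (Int × Int)) :
    ∃ acc', PySem.List.sorted (d :: t) pvKey = pvMin d t :: acc' := by
  rw [PySem.List.sorted_eq_foldl_insertBy]
  rw [List.foldl_cons]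
  exact pvInsert_head t d []

-- A's emptiness test agrees with the emptiness of the per-index delta list
theorem pvEmpty_iff (r c : Int) (grid : List String) :
    (PySem.List.pyRange 0 (grid.length : Int) 1).filterMap (pvDelta r c grid) = [] ↔
      grid.filter (fun row => PySem.Str.isIn "d" row) = [] := by
  rw [PySem.List.pyRange_zero_natCast, List.filterMap_map, List.filterMap_eq_nil_iff,
      List.filter_eq_nil_iff]
  constructor
  · intro h row hrow
    obtain ⟨k, hk, hkr⟩ := List.mem_iff_getElem.mp hrow
    have h2 := h k (List.mem_range.mpr hk)
    rw [Function.comp_apply, pvDelta, PySem.List.pyGetD_natCast,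
        List.getD_eq_getElem?_getD, List.getElem?_eq_getElem hk, Option.getD_some, hkr] at h2
    intro hc
    rw [if_pos hc] at h2
    exact Option.some_ne_none _ h2
  · intro h k hk
    have hk' := List.mem_range.mp hk
    rw [Function.comp_apply, pvDelta, PySem.List.pyGetD_natCast,
        List.getD_eq_getElem?_getD, List.getElem?_eq_getElem hk', Option.getD_some,
        if_neg (h grid[k] (List.getElem_mem hk'))]

-- A's map-over-positions pipeline is the per-index delta list
theorem pvDeltas_eq (r c : Int) (grid : List String) :
    ((PySem.List.pyRange 0 (grid.length : Int) 1).filterMap (fun i =>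
        if PySem.Str.isIn "d" (PySem.List.pyGetD grid i "") then
          some (i, PySem.Str.find (PySem.List.pyGetD grid i "") "d")
        else none)).map (fun p => (r - p.1, c - p.2))
      = (PySem.List.pyRange 0 (grid.length : Int) 1).filterMap (pvDelta r c grid) := by
  rw [List.map_filterMap]
  apply List.filterMap_congr
  intro i _
  rw [pvDelta]
  by_cases h : PySem.Str.isIn "d" (PySem.List.pyGetD grid i "") = true
  · rw [if_pos h, if_pos h]; rfl
  · rw [if_neg h, if_neg h]; rfl

-- ===== VERDICT (by name: the statement is the Claim_ definition above) =====
theorem getNextMove_spec : Claim_equal_getNextMove := by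
  intro r c grid _
  show getNextMove r c grid = getNextMove_alt r c grid
  simp only [getNextMove, getNextMove_alt]
  rw [pvFold_none r c grid, pvDeltas_eq r c grid]
  by_cases hemp : grid.filter (fun row => PySem.Str.isIn "d" row) = []
  · have hds := (pvEmpty_iff r c grid).mpr hemp
    rw [hds]
    have hlen : PySem.List.len (grid.filter (fun row => PySem.Str.isIn "d" row)) = 0 := by
      rw [hemp]; rfl
    rw [if_pos hlen]
  · have hds : (PySem.List.pyRange 0 (grid.length : Int) 1).filterMap (pvDelta r c grid) ≠ [] :=
      fun hh => hemp ((pvEmpty_iff r c grid).mp hh)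
    obtain ⟨d, t, hdt⟩ := List.exists_cons_of_ne_nil hds
    have hlen : ¬ PySem.List.len (grid.filter (fun row => PySem.Str.isIn "d" row)) = 0 := by
      rw [PySem.List.len_eq]
      intro h0
      exact hemp (List.eq_nil_of_length_eq_zero (by exact_mod_cast h0))
    rw [if_neg hlen, hdt]
    have hkey : PySem.List.sorted (d :: t) (fun x => |x.1| + |x.2|)
        = PySem.List.sorted (d :: t) pvKey := rfl
    obtain ⟨acc', hacc⟩ := pvSorted_head d t
    rw [hkey, hacc, PySem.List.pyGetD_zero_cons]
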